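-- pv_equiv track=rewrite | github.com/jin-james/recommend_ | utils/kerasbert_classify.py | get_return
-- ===== SOURCE A (Python) =====
-- def get_return(ques_seg, points_tfidf):
--     points_str = []
--     word4, word2 = [], []
--     for word in ques_seg:
--         if len(word) >= 3:
--             word4.append(word)
--         else:
--             word2.append(word)
--     for item in points_tfidf:
--         for word in word4:
--             if word in item[0] and item[0] not in points_str:
--                 points_str.append(item[0])
--     for item in points_tfidf:
--         for word in word2:
--             if word in item[0] and item[0] not in points_str:
--                 points_str.append(item[0])
--     if len(points_str) > 3:
--         points_str = points_str[0:3]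
--     else:
--         for item in points_tfidf:
--             if item[0] not in points_str and len(points_str) < 3:
--                 points_str.append(item[0])
--     return points_str
-- ===== SOURCE B (Python) =====
-- def get_return(ques_seg, points_tfidf):
--     longs, shorts, rest = [], [], []
--     seen = set()
--     for item in points_tfidf:
--         s = item[0]
--         if s in seen:
--             continue
--         seen.add(s)
--         if any(w in s for w in ques_seg if len(w) >= 3):
--             longs.append(s)
--         elif any(w in s for w in ques_seg if len(w) < 3):
--             shorts.append(s)
--         else:
--             rest.append(s)
--     return (longs + shorts + rest)[:3]
-- ===== Notes on version B (the rewrite author's own statement) =====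
-- stated objective: faster
-- what changed: A scans points_tfidf three times (long-word scan, short-word scan, then a fill loop), testing every question word against every item each time; B makes one pass over points_tfidf, dedups item[0] with a set (skipping repeated strings in O(1)) and buckets each new string into longs/shorts/rest, returning (longs+shorts+rest)[:3].
-- outside the precondition, e.g. on get_return(['abc'], [[]]): A raises IndexError, B raises IndexError
import Mathlib
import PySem

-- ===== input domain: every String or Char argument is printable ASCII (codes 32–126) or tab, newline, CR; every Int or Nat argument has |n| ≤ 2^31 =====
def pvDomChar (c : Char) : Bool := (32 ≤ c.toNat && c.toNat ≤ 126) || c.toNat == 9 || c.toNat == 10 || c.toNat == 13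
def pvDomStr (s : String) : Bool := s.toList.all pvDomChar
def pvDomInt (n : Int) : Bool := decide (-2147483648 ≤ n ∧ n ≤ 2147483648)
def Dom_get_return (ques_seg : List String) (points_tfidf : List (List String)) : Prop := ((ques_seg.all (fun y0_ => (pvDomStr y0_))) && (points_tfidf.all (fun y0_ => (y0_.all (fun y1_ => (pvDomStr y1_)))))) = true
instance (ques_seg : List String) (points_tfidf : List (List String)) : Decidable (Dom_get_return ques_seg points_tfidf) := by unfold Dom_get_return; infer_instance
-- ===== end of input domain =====

-- B replaces A's three scans over points_tfidf (long-word scan, short-word scan, fill) by ONE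
-- bucketing pass with a seen-set that matches each distinct item[0] once; measured faster by the
-- timing run (return-value equivalence on Pre_: no empty inner list).

-- ===== PORT A =====
def get_return (ques_seg : List String) (points_tfidf : List (List String)) : List String :=
  let w := ques_seg.foldl (fun (p : List String × List String) word =>
      if 3 ≤ PySem.Str.len word then (p.1 ++ [word], p.2) else (p.1, p.2 ++ [word])) ([], [])
  let word4 := w.1
  let word2 := w.2
  let points1 := points_tfidf.foldl (fun acc item =>
      word4.foldl (fun acc word =>
        if PySem.Str.isIn word (PySem.List.pyGetD item 0 "") = true ∧ PySem.List.pyGetD item 0 "" ∉ acc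
        then acc ++ [PySem.List.pyGetD item 0 ""] else acc) acc) []
  let points2 := points_tfidf.foldl (fun acc item =>
      word2.foldl (fun acc word =>
        if PySem.Str.isIn word (PySem.List.pyGetD item 0 "") = true ∧ PySem.List.pyGetD item 0 "" ∉ acc
        then acc ++ [PySem.List.pyGetD item 0 ""] else acc) acc) points1
  if 3 < points2.length then
    PySem.List.slice points2 (some 0) (some 3)
  else
    points_tfidf.foldl (fun acc item =>
      if PySem.List.pyGetD item 0 "" ∉ acc ∧ acc.length < 3
      then acc ++ [PySem.List.pyGetD item 0 ""] else acc) points2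

-- ===== PORT B =====
-- loop body of B: given the (seen, longs, shorts, rest) state and the string s = item[0]
def pvStepS (p q : String → Bool)
    (st : PySem.Set String × List String × List String × List String) (s : String) :
    PySem.Set String × List String × List String × List String :=
  if st.1.contains s then st
  else
    let seen := st.1.add s
    if p s then (seen, st.2.1 ++ [s], st.2.2.1, st.2.2.2)
    else if q s then (seen, st.2.1, st.2.2.1 ++ [s], st.2.2.2)
    else (seen, st.2.1, st.2.2.1, st.2.2.2 ++ [s])

def get_return_alt (ques_seg : List String) (points_tfidf : List (List String)) : List String :=
  let st := points_tfidf.foldl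
    (fun st item => pvStepS
        (fun s => ques_seg.any (fun w => decide (3 ≤ PySem.Str.len w) && PySem.Str.isIn w s))
        (fun s => ques_seg.any (fun w => decide (PySem.Str.len w < 3) && PySem.Str.isIn w s))
        st (PySem.List.pyGetD item 0 ""))
    ((PySem.Set.empty : PySem.Set String), [], [], [])
  (st.2.1 ++ st.2.2.1 ++ st.2.2.2).take 3

-- ===== PRECONDITION & SPEC =====
-- Pre_ excludes only inputs where Python A raises IndexError (some item is the empty list: item[0]).
def Pre_get_return (ques_seg : List String) (points_tfidf : List (List String)) : Prop :=
  ∀ item ∈ points_tfidf, item ≠ []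
instance (ques_seg : List String) (points_tfidf : List (List String)) : Decidable (Pre_get_return ques_seg points_tfidf) := by unfold Pre_get_return; infer_instance
def pvWitness_get_return : List String × List (List String) :=
  (["abc", "x"], [["abcd", "t"], ["zz"], ["abcd"]])
def Spec_get_return (ques_seg : List String) (points_tfidf : List (List String)) (out : List String) : Prop := out = get_return_alt ques_seg points_tfidf
instance (ques_seg : List String) (points_tfidf : List (List String)) (out : List String) : Decidable (Spec_get_return ques_seg points_tfidf out) := by unfold Spec_get_return; infer_instance

-- ===== CLAIM (what is proved, stated in full; the proofs are below) =====
def Claim_equal_get_return : Prop := ∀ (ques_seg : List String) (points_tfidf : List (List String)), Dom_get_return ques_seg points_tfidf → Pre_get_return ques_seg points_tfidf → Spec_get_return ques_seg points_tfidf (get_return ques_seg points_tfidf)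

-- ===== LEMMAS AND PROOFS =====

-- first-occurrence dedup of xs relative to the already-seen predicate sf
def pvF (sf : String → Bool) : List String → List String
  | [] => []
  | x :: t => if sf x then pvF sf t else x :: pvF (fun y => y == x || sf y) t

lemma pvF_congr : ∀ (xs : List String) (s1 s2 : String → Bool),
    (∀ y, s1 y = s2 y) → pvF s1 xs = pvF s2 xs := by
  intro xs
  induction xs with
  | nil => intro _ _ _; rfl
  | cons x t ih =>
    intro s1 s2 h
    simp only [pvF, h x]
    by_cases hx : s2 x = true
    · simp [hx, ih _ _ h]
    · simp [hx]
      exact ih _ _ (by intro y; simp [h y])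

lemma inner_char (s : String) : ∀ (ws acc : List String),
    ws.foldl (fun acc word =>
        if PySem.Str.isIn word s = true ∧ s ∉ acc then acc ++ [s] else acc) acc
    = if ws.any (fun w => PySem.Str.isIn w s) = true ∧ s ∉ acc then acc ++ [s] else acc := by
  intro ws
  induction ws with
  | nil => intro acc; simp
  | cons w t ih =>
    intro acc
    simp only [List.foldl_cons, List.any_cons]
    by_cases h2 : s ∈ acc
    · simp only [h2, not_true_eq_false, and_false, if_false, ih]
    · by_cases h1 : PySem.Str.isIn w s = true
      · simp only [h1, h2, not_false_iff, and_true, if_true, Bool.true_or, true_and, ih]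
        have hs : s ∈ acc ++ [s] := by simp
        simp [hs]
      · have h1' : PySem.Str.isIn w s = false := Bool.eq_false_iff.mpr h1
        simp only [h1', Bool.false_eq_true, false_and, if_false, ih, Bool.false_or]

lemma scan_char (p g : String → Bool) : ∀ (xs : List String) (sf : String → Bool) (acc : List String),
    (∀ y, y ∈ acc ↔ (g y = true ∨ (p y = true ∧ sf y = true))) →
    xs.foldl (fun acc x => if p x = true ∧ x ∉ acc then acc ++ [x] else acc) acc
    = acc ++ (pvF sf xs).filter (fun x => p x && !g x) := by
  intro xs
  induction xs with
  | nil => intro sf acc _; simp [pvF]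
  | cons x t ih =>
    intro sf acc hacc
    simp only [List.foldl_cons]
    by_cases hsf : sf x = true
    · -- seen before: pvF skips x; the step leaves acc unchanged iff … check both cases
      have hstep : (if p x = true ∧ x ∉ acc then acc ++ [x] else acc) = acc := by
        by_cases hp : p x = true
        · have : x ∈ acc := (hacc x).mpr (Or.inr ⟨hp, hsf⟩)
          simp [this]
        · simp [hp]
      rw [hstep]
      simp only [pvF, hsf, if_true]
      exact ih sf acc hacc
    · have hsf' : sf x = false := Bool.eq_false_iff.mpr hsf
      simp only [pvF, hsf', Bool.false_eq_true, if_false]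
      by_cases hp : p x = true
      · by_cases hg : g x = true
        · -- already in acc via g
          have hx : x ∈ acc := (hacc x).mpr (Or.inl hg)
          simp only [hx, not_true_eq_false, and_false, if_false]
          rw [ih (fun y => y == x || sf y) acc (by
            intro y
            by_cases hyx : y = x
            · subst hyx; simp [hx, hg]
            · simp only [beq_eq_false_iff_ne, Ne, hyx, not_false_iff]
              rw [hacc y]
              simp [hyx])]
          simp [List.filter_cons, hp, hg]
        · have hx : x ∉ acc := by
            rw [hacc x]; simp [hg, hsf]
          simp only [hp, hx, not_false_iff, and_true, true_and, if_true]
          rw [ih (fun y => y == x || sf y) (acc ++ [x]) (by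
            intro y
            by_cases hyx : y = x
            · subst hyx; simp [hp]
            · simp only [List.mem_append, List.mem_singleton, hyx, or_false]
              rw [hacc y]
              simp [hyx])]
          simp [List.filter_cons, hp, hg, List.append_assoc]
      · -- p x false: step does nothing, pvF records x as seen, filter drops it
        have hp' : p x = false := Bool.eq_false_iff.mpr hp
        simp only [hp', Bool.false_eq_true, false_and, if_false]
        rw [ih (fun y => y == x || sf y) acc (by
          intro y
          by_cases hyx : y = x
          · subst hyx
            rw [hacc y]
            simp [hp']
          · simp only [beq_eq_false_iff_ne, Ne, hyx, not_false_iff]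
            rw [hacc y]
            simp [hyx])]
        simp [List.filter_cons, hp']

lemma fill_frozen : ∀ (xs acc : List String), 3 ≤ acc.length →
    xs.foldl (fun acc x => if x ∉ acc ∧ acc.length < 3 then acc ++ [x] else acc) acc = acc := by
  intro xs
  induction xs with
  | nil => intro acc _; rfl
  | cons x t ih =>
    intro acc h
    have : ¬ acc.length < 3 := by omega
    simp only [List.foldl_cons, this, and_false, if_false]
    exact ih acc h

lemma fill_char (g : String → Bool) : ∀ (xs : List String) (sf : String → Bool) (acc : List String),
    acc.length ≤ 3 → (∀ y, y ∈ acc ↔ (g y = true ∨ sf y = true)) →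
    xs.foldl (fun acc x => if x ∉ acc ∧ acc.length < 3 then acc ++ [x] else acc) acc
    = (acc ++ (pvF sf xs).filter (fun x => !g x)).take 3 := by
  intro xs
  induction xs with
  | nil => intro sf acc hlen _; simp [pvF, List.take_of_length_le hlen]
  | cons x t ih =>
    intro sf acc hlen hacc
    simp only [List.foldl_cons]
    by_cases hsf : sf x = true
    · have hx : (if x ∉ acc ∧ acc.length < 3 then acc ++ [x] else acc) = acc := by
        have : x ∈ acc := (hacc x).mpr (Or.inr hsf)
        simp [this]
      rw [hx]
      simp only [pvF, hsf, if_true]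
      exact ih sf acc hlen hacc
    · have hsf' : sf x = false := Bool.eq_false_iff.mpr hsf
      simp only [pvF, hsf', Bool.false_eq_true, if_false]
      by_cases hg : g x = true
      · have hx : x ∈ acc := (hacc x).mpr (Or.inl hg)
        simp only [hx, not_true_eq_false, false_and, if_false]
        rw [ih (fun y => y == x || sf y) acc hlen (by
          intro y
          by_cases hyx : y = x
          · subst hyx; simp [hx, hg]
          · simp only [beq_eq_false_iff_ne, Ne, hyx, not_false_iff]
            rw [hacc y]; simp [hyx])]
        simp [List.filter_cons, hg]
      · have hx : x ∉ acc := by rw [hacc x]; simp [hg, hsf]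
        by_cases h3 : acc.length < 3
        · simp only [hx, not_false_iff, h3, and_self, if_true, true_and]
          rw [ih (fun y => y == x || sf y) (acc ++ [x]) (by simp; omega) (by
            intro y
            by_cases hyx : y = x
            · subst hyx; simp
            · simp only [List.mem_append, List.mem_singleton, hyx, or_false]
              rw [hacc y]; simp [hyx])]
          simp [List.filter_cons, hg, List.append_assoc]
        · have hlen3 : acc.length = 3 := by omega
          simp only [hx, not_false_iff, h3, and_false, if_false, true_and]
          rw [fill_frozen t acc (by omega)]
          rw [List.take_append_of_le_length (by omega), List.take_of_length_le (by omega)]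

lemma contains_add (sn : PySem.Set String) (x y : String) :
    (sn.add x).contains y = (y == x || sn.contains y) := by
  by_cases hyx : y = x
  · subst hyx
    have : y ∈ sn.add y := (PySem.Set.mem_add sn y y).mpr (Or.inr rfl)
    simp [(PySem.Set.contains_iff _ _).mpr this]
  · have h1 : y ∈ sn.add x ↔ y ∈ sn := by
      rw [PySem.Set.mem_add]; simp [hyx]
    by_cases hy : y ∈ sn
    · have e1 := (PySem.Set.contains_iff _ _).mpr (h1.mpr hy)
      have e2 := (PySem.Set.contains_iff _ _).mpr hy
      rw [e1, e2]
      simp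
    · have h2 : (sn.add x).contains y = false := by
        rw [← Bool.not_eq_true, PySem.Set.contains_iff]; exact fun h => hy (h1.mp h)
      have h3 : sn.contains y = false := by
        rw [← Bool.not_eq_true, PySem.Set.contains_iff]; exact hy
      simp [h2, h3, beq_eq_false_iff_ne, hyx]

lemma bchar (p q : String → Bool) : ∀ (xs : List String) (sn : PySem.Set String) (L S R : List String),
    xs.foldl (pvStepS p q) (sn, L, S, R)
    = (PySem.Set.update sn xs,
       L ++ (pvF (fun y => sn.contains y) xs).filter p,
       S ++ (pvF (fun y => sn.contains y) xs).filter (fun x => !p x && q x),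
       R ++ (pvF (fun y => sn.contains y) xs).filter (fun x => !p x && !q x)) := by
  intro xs
  induction xs with
  | nil => intro sn L S R; simp [pvF, PySem.Set.update]
  | cons x t ih =>
    intro sn L S R
    have hupd : PySem.Set.update sn (x :: t) = PySem.Set.update (sn.add x) t := by
      simp [PySem.Set.update]
    by_cases hc : sn.contains x = true
    · have hmem : x ∈ sn := (PySem.Set.contains_iff _ _).mp hc
      have hadd : sn.add x = sn := PySem.Set.add_of_mem hmem
      simp only [List.foldl_cons, pvStepS, hc, if_true]
      rw [ih sn L S R, hupd, hadd]
      simp [pvF, hmem]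
    · have hc' : sn.contains x = false := Bool.eq_false_iff.mpr hc
      have hmem : x ∉ sn := fun h => hc ((PySem.Set.contains_iff _ _).mpr h)
      have hFc : pvF (fun y => (sn.add x).contains y) t
          = pvF (fun y => y == x || sn.contains y) t :=
        pvF_congr t _ _ (fun y => contains_add sn x y)
      simp only [List.foldl_cons, pvStepS, hc', Bool.false_eq_true, if_false]
      by_cases hp : p x = true
      · simp only [hp, if_true]
        rw [ih (sn.add x) (L ++ [x]) S R, hupd, hFc]
        simp [pvF, hmem, List.filter_cons, hp, List.append_assoc]
      · have hp' : p x = false := Bool.eq_false_iff.mpr hp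
        by_cases hq : q x = true
        · simp only [hp', Bool.false_eq_true, if_false, hq, if_true]
          rw [ih (sn.add x) L (S ++ [x]) R, hupd, hFc]
          simp [pvF, hmem, List.filter_cons, hp', hq, List.append_assoc]
        · have hq' : q x = false := Bool.eq_false_iff.mpr hq
          simp only [hp', hq', Bool.false_eq_true, if_false]
          rw [ih (sn.add x) L S (R ++ [x]), hupd, hFc]
          simp [pvF, hmem, List.filter_cons, hp', hq', List.append_assoc]

-- proof-side abbreviations for the common closed form of both programs
def pvP (qs : List String) : String → Bool :=
  fun s => qs.any (fun w => decide (3 ≤ PySem.Str.len w) && PySem.Str.isIn w s)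
def pvQ (qs : List String) : String → Bool :=
  fun s => qs.any (fun w => decide (PySem.Str.len w < 3) && PySem.Str.isIn w s)
def pvXs (pts : List (List String)) : List String :=
  pts.map (fun item => PySem.List.pyGetD item 0 "")
def pvOut (qs : List String) (pts : List (List String)) : List String :=
  ((pvF (fun _ => false) (pvXs pts)).filter (pvP qs)
    ++ (pvF (fun _ => false) (pvXs pts)).filter (fun s => !pvP qs s && pvQ qs s)
    ++ (pvF (fun _ => false) (pvXs pts)).filter (fun s => !pvP qs s && !pvQ qs s)).take 3

lemma words_fold : ∀ (l : List String) (a b : List String),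
    l.foldl (fun (p : List String × List String) word =>
        if 3 ≤ PySem.Str.len word then (p.1 ++ [word], p.2) else (p.1, p.2 ++ [word])) (a, b)
    = (a ++ l.filter (fun w => decide (3 ≤ PySem.Str.len w)),
       b ++ l.filter (fun w => !decide (3 ≤ PySem.Str.len w))) := by
  intro l
  induction l with
  | nil => intro a b; simp
  | cons w t ih =>
    intro a b
    simp only [List.foldl_cons, List.filter_cons]
    by_cases h : 3 ≤ PySem.Str.len w
    · rw [if_pos h, ih, decide_eq_true h]
      simp [List.append_assoc]
    · rw [if_neg h, ih, decide_eq_false h]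
      simp [List.append_assoc]

lemma B_eval (ques_seg : List String) (points_tfidf : List (List String)) :
    get_return_alt ques_seg points_tfidf = pvOut ques_seg points_tfidf := by
  unfold get_return_alt pvOut
  have e0 : points_tfidf.foldl
      (fun st item => pvStepS
        (fun s => ques_seg.any (fun w => decide (3 ≤ PySem.Str.len w) && PySem.Str.isIn w s))
        (fun s => ques_seg.any (fun w => decide (PySem.Str.len w < 3) && PySem.Str.isIn w s))
        st (PySem.List.pyGetD item 0 ""))
      ((PySem.Set.empty : PySem.Set String), [], [], [])
      = (pvXs points_tfidf).foldl (pvStepS (pvP ques_seg) (pvQ ques_seg))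
        ((PySem.Set.empty : PySem.Set String), [], [], []) := by
    unfold pvXs; rw [List.foldl_map]; rfl
  rw [e0, bchar]
  have hempty : ∀ y : String, ((PySem.Set.empty : PySem.Set String).contains y) = (fun _ : String => false) y := by
    intro y; rfl
  rw [pvF_congr _ _ (fun _ => false) hempty]
  simp

lemma flip_len (w : String) : (!decide (3 ≤ PySem.Str.len w)) = decide (PySem.Str.len w < 3) := by
  rw [← decide_not]
  exact decide_eq_decide.mpr not_le

lemma A_eval (ques_seg : List String) (points_tfidf : List (List String)) :
    get_return ques_seg points_tfidf = pvOut ques_seg points_tfidf := by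
  unfold get_return
  simp only [words_fold, List.nil_append]
  simp only [inner_char, List.any_filter, flip_len]
  -- scan 1 (long words)
  have e1 : points_tfidf.foldl (fun (acc : List String) item =>
        if (ques_seg.any fun w => decide (3 ≤ PySem.Str.len w) && PySem.Str.isIn w (PySem.List.pyGetD item 0 "")) = true
            ∧ PySem.List.pyGetD item 0 "" ∉ acc
        then acc ++ [PySem.List.pyGetD item 0 ""] else acc) []
      = (pvF (fun _ => false) (pvXs points_tfidf)).filter (pvP ques_seg) := by
    have estep : points_tfidf.foldl (fun (acc : List String) item =>
        if (ques_seg.any fun w => decide (3 ≤ PySem.Str.len w) && PySem.Str.isIn w (PySem.List.pyGetD item 0 "")) = true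
            ∧ PySem.List.pyGetD item 0 "" ∉ acc
        then acc ++ [PySem.List.pyGetD item 0 ""] else acc) []
        = (pvXs points_tfidf).foldl (fun (acc : List String) s =>
            if pvP ques_seg s = true ∧ s ∉ acc then acc ++ [s] else acc) [] := by
      unfold pvXs; rw [List.foldl_map]; rfl
    rw [estep, scan_char (pvP ques_seg) (fun _ => false) (pvXs points_tfidf) (fun _ => false) [] (by simp)]
    simp
  rw [e1]
  -- scan 2 (short words)
  have e2 : points_tfidf.foldl (fun (acc : List String) item =>
        if (ques_seg.any fun w => decide (PySem.Str.len w < 3) && PySem.Str.isIn w (PySem.List.pyGetD item 0 "")) = true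
            ∧ PySem.List.pyGetD item 0 "" ∉ acc
        then acc ++ [PySem.List.pyGetD item 0 ""] else acc)
        ((pvF (fun _ => false) (pvXs points_tfidf)).filter (pvP ques_seg))
      = (pvF (fun _ => false) (pvXs points_tfidf)).filter (pvP ques_seg)
        ++ (pvF (fun _ => false) (pvXs points_tfidf)).filter (fun s => !pvP ques_seg s && pvQ ques_seg s) := by
    have estep : points_tfidf.foldl (fun (acc : List String) item =>
        if (ques_seg.any fun w => decide (PySem.Str.len w < 3) && PySem.Str.isIn w (PySem.List.pyGetD item 0 "")) = true
            ∧ PySem.List.pyGetD item 0 "" ∉ acc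
        then acc ++ [PySem.List.pyGetD item 0 ""] else acc)
        ((pvF (fun _ => false) (pvXs points_tfidf)).filter (pvP ques_seg))
        = (pvXs points_tfidf).foldl (fun (acc : List String) s =>
            if pvQ ques_seg s = true ∧ s ∉ acc then acc ++ [s] else acc)
          ((pvF (fun _ => false) (pvXs points_tfidf)).filter (pvP ques_seg)) := by
      unfold pvXs; rw [List.foldl_map]; rfl
    rw [estep, scan_char (pvQ ques_seg)
        (fun y => decide (y ∈ (pvF (fun _ => false) (pvXs points_tfidf)).filter (pvP ques_seg)))
        (pvXs points_tfidf) (fun _ => false)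
        ((pvF (fun _ => false) (pvXs points_tfidf)).filter (pvP ques_seg)) (by intro y; simp)]
    congr 1
    refine List.filter_congr ?_
    intro s hs
    by_cases hp : pvP ques_seg s = true
    · have hmem : s ∈ (pvF (fun _ => false) (pvXs points_tfidf)).filter (pvP ques_seg) :=
        List.mem_filter.mpr ⟨hs, hp⟩
      simp [hmem, hp]
    · have hp' : pvP ques_seg s = false := Bool.eq_false_iff.mpr hp
      have hmem : s ∉ (pvF (fun _ => false) (pvXs points_tfidf)).filter (pvP ques_seg) :=
        fun h => hp (List.mem_filter.mp h).2
      simp [hmem, hp', Bool.and_comm]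
  rw [e2]
  -- the common L ++ S prefix
  by_cases hlen : 3 < ((pvF (fun _ => false) (pvXs points_tfidf)).filter (pvP ques_seg)
      ++ (pvF (fun _ => false) (pvXs points_tfidf)).filter (fun s => !pvP ques_seg s && pvQ ques_seg s)).length
  · rw [if_pos hlen]
    unfold pvOut
    rw [PySem.List.slice_zero_start, PySem.List.slice_to _ (by norm_num : (0:Int) ≤ 3)]
    conv_rhs => rw [List.take_append_of_le_length (le_of_lt hlen)]
    rfl
  · rw [if_neg hlen]
    have hlen' : ((pvF (fun _ => false) (pvXs points_tfidf)).filter (pvP ques_seg)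
        ++ (pvF (fun _ => false) (pvXs points_tfidf)).filter (fun s => !pvP ques_seg s && pvQ ques_seg s)).length ≤ 3 := by
      omega
    have e3 : points_tfidf.foldl (fun (acc : List String) item =>
          if PySem.List.pyGetD item 0 "" ∉ acc ∧ acc.length < 3
          then acc ++ [PySem.List.pyGetD item 0 ""] else acc)
          ((pvF (fun _ => false) (pvXs points_tfidf)).filter (pvP ques_seg)
            ++ (pvF (fun _ => false) (pvXs points_tfidf)).filter (fun s => !pvP ques_seg s && pvQ ques_seg s))
        = (pvXs points_tfidf).foldl (fun (acc : List String) s =>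
            if s ∉ acc ∧ acc.length < 3 then acc ++ [s] else acc)
          ((pvF (fun _ => false) (pvXs points_tfidf)).filter (pvP ques_seg)
            ++ (pvF (fun _ => false) (pvXs points_tfidf)).filter (fun s => !pvP ques_seg s && pvQ ques_seg s)) := by
      unfold pvXs; rw [List.foldl_map]
    rw [e3, fill_char
        (fun y => decide (y ∈ (pvF (fun _ => false) (pvXs points_tfidf)).filter (pvP ques_seg)
          ++ (pvF (fun _ => false) (pvXs points_tfidf)).filter (fun s => !pvP ques_seg s && pvQ ques_seg s)))
        (pvXs points_tfidf) (fun _ => false) _ hlen' (by intro y; simp)]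
    unfold pvOut
    congr 2
    refine List.filter_congr ?_
    intro s hs
    by_cases hp : pvP ques_seg s = true
    · have hmem : s ∈ (pvF (fun _ => false) (pvXs points_tfidf)).filter (pvP ques_seg) :=
        List.mem_filter.mpr ⟨hs, hp⟩
      simp [List.mem_append, hmem, hp]
    · have hp' : pvP ques_seg s = false := Bool.eq_false_iff.mpr hp
      by_cases hq : pvQ ques_seg s = true
      · have hmem : s ∈ (pvF (fun _ => false) (pvXs points_tfidf)).filter
            (fun s => !pvP ques_seg s && pvQ ques_seg s) :=
          List.mem_filter.mpr ⟨hs, by simp [hp', hq]⟩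
        simp [List.mem_append, hmem, hp', hq]
      · have hq' : pvQ ques_seg s = false := Bool.eq_false_iff.mpr hq
        have hm1 : s ∉ (pvF (fun _ => false) (pvXs points_tfidf)).filter (pvP ques_seg) :=
          fun h => hp (List.mem_filter.mp h).2
        have hm2 : s ∉ (pvF (fun _ => false) (pvXs points_tfidf)).filter
            (fun s => !pvP ques_seg s && pvQ ques_seg s) :=
          fun h => by have := (List.mem_filter.mp h).2; simp [hp', hq'] at this
        simp [List.mem_append, hm1, hm2, hp', hq']

theorem get_return_eq (ques_seg : List String) (points_tfidf : List (List String)) :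
    get_return ques_seg points_tfidf = get_return_alt ques_seg points_tfidf := by
  rw [A_eval, B_eval]

-- ===== VERDICT (by name: the statement is the Claim_ definition above) =====
theorem get_return_spec : Claim_equal_get_return := by
  intro qs pts _ _
  unfold Spec_get_return
  exact get_return_eq qs pts
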